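-- pv_equiv track=rewrite | github.com/ruapotato/MAGI | llm_menu.py | parse_message_with_code
-- ===== SOURCE A (Python) =====
-- def parse_message_with_code(text):
--     """Split a message into regular text and code blocks"""
--     parts = []
--     current_text = []
--     code_block = False
--     code_language = None
--
--     lines = text.split('\n')
--     i = 0
--     while i < len(lines):
--         line = lines[i]
--         if line.startswith('```'):
--             if code_block:  # End of code block
--                 if current_text:
--                     parts.append(('code', '\n'.join(current_text)))
--                     current_text = []
--                 code_block = False
--                 code_language = None
--             else:  # Start of code block
--                 if current_text:
--                     parts.append(('text', '\n'.join(current_text)))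
--                     current_text = []
--                 code_block = True
--                 # Check for language specification
--                 code_language = line[3:].strip()
--             i += 1
--         else:
--             current_text.append(line)
--             i += 1
--
--     # Add any remaining text
--     if current_text:
--         parts.append(('code' if code_block else 'text', '\n'.join(current_text)))
--
--     # Clean up the parts
--     cleaned_parts = []
--     for part_type, content in parts:
--         # Remove any leading/trailing empty lines
--         content = content.strip('\n')
--         if content:  # Only add if there's actual content
--             cleaned_parts.append((part_type, content))
--
--     return cleaned_parts
-- ===== SOURCE B (Python) =====
-- def parse_message_with_code(text):
--     """Split a message into regular text and code blocks"""
--     segments = [[]]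
--     for line in text.split('\n'):
--         if line.startswith('```'):
--             segments.append([])
--         else:
--             segments[-1].append(line)
--     parts = []
--     for idx, seg in enumerate(segments):
--         content = '\n'.join(seg).strip('\n')
--         if content:
--             parts.append(('text' if idx % 2 == 0 else 'code', content))
--     return parts
-- ===== Notes on version B (the rewrite author's own statement) =====
-- stated objective: alternative
-- what changed: Replaces A's stateful while-loop (code_block flag, flush-on-fence, trailing flush, then a cleanup pass) with a group-then-classify pass: lines are partitioned into segments at fence lines and each segment is typed by its index parity, joined, stripped and kept if non-empty.
import Mathlib
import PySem

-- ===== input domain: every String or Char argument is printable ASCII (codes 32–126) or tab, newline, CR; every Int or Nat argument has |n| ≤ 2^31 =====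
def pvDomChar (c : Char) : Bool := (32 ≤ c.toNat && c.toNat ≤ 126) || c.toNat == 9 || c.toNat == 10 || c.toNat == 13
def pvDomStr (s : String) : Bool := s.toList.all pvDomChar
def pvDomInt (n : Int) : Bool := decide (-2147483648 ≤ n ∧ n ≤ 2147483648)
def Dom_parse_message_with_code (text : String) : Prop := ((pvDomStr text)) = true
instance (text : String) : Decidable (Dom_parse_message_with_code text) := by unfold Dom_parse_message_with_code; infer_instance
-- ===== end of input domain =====

-- B groups lines into fence-delimited segments and classifies them by index parity,
-- instead of A's running code_block flag with flush-on-fence and a separate cleanup pass.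

-- shared thin wrappers for the Python builtins both versions call
-- text.split('\n'): the separator is non-empty, so PySem.Str.split? never returns none
def pvSplit (text : String) : List String := (PySem.Str.split? text "\n").getD []
def pvJoin (xs : List String) : String := PySem.Str.join "\n" xs
def pvStripNl (s : String) : String := PySem.Str.stripChars s "\n"

-- ===== PORT A =====
-- the while-loop of A; `code_language` is computed in A but never used, so it is omitted
def loopA : List String → List (String × String) → List String → Bool → List (String × String)
  | [], parts, cur, cb =>
      -- "Add any remaining text"
      if cur ≠ [] then parts ++ [((if cb then "code" else "text"), pvJoin cur)] else parts
  | l :: ls, parts, cur, cb =>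
      if PySem.Str.startswith l "```" then
        if cb then  -- End of code block
          loopA ls (if cur ≠ [] then parts ++ [("code", pvJoin cur)] else parts) [] false
        else        -- Start of code block
          loopA ls (if cur ≠ [] then parts ++ [("text", pvJoin cur)] else parts) [] true
      else
        loopA ls parts (cur ++ [l]) cb

-- "Clean up the parts" for-loop
def cleanA : List (String × String) → List (String × String)
  | [] => []
  | (t, c) :: rest =>
      let c' := pvStripNl c
      (if c' ≠ "" then [(t, c')] else []) ++ cleanA rest

def parse_message_with_code (text : String) : List (String × String) :=
  cleanA (loopA (pvSplit text) [] [] false)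

-- ===== PORT B =====
-- the first for-loop of B: accumulated completed segments plus the current (last) segment
def segsB : List String → List (List String) → List String → List (List String)
  | [], acc, cur => acc ++ [cur]
  | l :: ls, acc, cur =>
      if PySem.Str.startswith l "```" then segsB ls (acc ++ [cur]) []
      else segsB ls acc (cur ++ [l])

-- the second for-loop of B (enumerate carried as the index)
def renderB : List (List String) → Nat → List (String × String)
  | [], _ => []
  | seg :: rest, idx =>
      let content := pvStripNl (pvJoin seg)
      (if content ≠ "" then [((if idx % 2 == 0 then "text" else "code"), content)] else [])
        ++ renderB rest (idx + 1)

def parse_message_with_code_alt (text : String) : List (String × String) :=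
  renderB (segsB (pvSplit text) [] []) 0

-- ===== PRECONDITION & SPEC =====
def Spec_parse_message_with_code (text : String) (out : List (String × String)) : Prop := out = parse_message_with_code_alt text
instance (text : String) (out : List (String × String)) : Decidable (Spec_parse_message_with_code text out) := by unfold Spec_parse_message_with_code; infer_instance

-- ===== CLAIM (what is proved, stated in full; the proofs are below) =====
def Claim_equal_parse_message_with_code : Prop := ∀ (text : String), Dom_parse_message_with_code text → Spec_parse_message_with_code text (parse_message_with_code text)

-- ===== LEMMAS AND PROOFS =====

theorem cleanA_append (xs ys : List (String × String)) :
    cleanA (xs ++ ys) = cleanA xs ++ cleanA ys := by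
  induction xs with
  | nil => simp [cleanA]
  | cons p rest ih => cases p; simp [cleanA, ih]

theorem segsB_acc (ls : List String) : ∀ (acc : List (List String)) (cur : List String),
    segsB ls acc cur = acc ++ segsB ls [] cur := by
  induction ls with
  | nil => intro acc cur; simp [segsB]
  | cons l ls ih =>
      intro acc cur
      by_cases h : PySem.Str.startswith l "```" = true
      · rw [segsB, if_pos h, segsB, if_pos h, ih (acc ++ [cur]), ih ([] ++ [cur])]
        simp
      · rw [segsB, if_neg h, segsB, if_neg h, ih acc, ih []]

theorem stripJoin_nil : pvStripNl (pvJoin []) = "" := by decide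

-- the head part contributed by flushing `cur` with code-flag (n % 2 == 1)
theorem clean_flush (parts : List (String × String)) (cur : List String) (n : Nat) :
    cleanA (if cur ≠ [] then
              parts ++ [((if (n % 2 == 1 : Bool) then "code" else "text"), pvJoin cur)]
            else parts)
      = cleanA parts ++
        (if pvStripNl (pvJoin cur) ≠ "" then
            [((if (n % 2 == 0 : Bool) then "text" else "code"), pvStripNl (pvJoin cur))]
          else []) := by
  by_cases hc : cur = []
  · subst hc; simp [stripJoin_nil]
  · rw [if_pos (by simpa using hc), cleanA_append]
    have hpar : (if (n % 2 == 1 : Bool) then "code" else "text")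
        = (if (n % 2 == 0 : Bool) then "text" else "code") := by
      rcases Nat.mod_two_eq_zero_or_one n with h | h <;> simp [h]
    rw [hpar]; simp [cleanA]

theorem main_loop (ls : List String) : ∀ (parts : List (String × String)) (cur : List String) (n : Nat),
    cleanA (loopA ls parts cur (n % 2 == 1)) = cleanA parts ++ renderB (segsB ls [] cur) n := by
  induction ls with
  | nil =>
      intro parts cur n
      rw [loopA, clean_flush]
      simp [segsB, renderB]
  | cons l ls ih =>
      intro parts cur n
      by_cases h : PySem.Str.startswith l "```" = true
      · have hflip : (!(n % 2 == 1 : Bool)) = ((n + 1) % 2 == 1 : Bool) := by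
          rcases Nat.mod_two_eq_zero_or_one n with hp | hp <;>
            simp [hp, Nat.add_mod]
        have step : loopA (l :: ls) parts cur (n % 2 == 1)
            = loopA ls
                (if cur ≠ [] then
                    parts ++ [((if (n % 2 == 1 : Bool) then "code" else "text"), pvJoin cur)]
                  else parts)
                [] ((n + 1) % 2 == 1) := by
          rw [loopA, if_pos h]
          rcases Nat.mod_two_eq_zero_or_one n with hp | hp <;>
            simp [hp, Nat.add_mod]
        rw [step, ih _ [] (n + 1), clean_flush]
        rw [segsB, if_pos h, segsB_acc ls ([] ++ [cur]) []]
        simp [renderB]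
      · rw [loopA, if_neg h, segsB, if_neg h, ih parts (cur ++ [l]) n]

-- ===== VERDICT (by name: the statement is the Claim_ definition above) =====
theorem parse_message_with_code_spec : Claim_equal_parse_message_with_code := by
  intro text _
  unfold Spec_parse_message_with_code parse_message_with_code parse_message_with_code_alt
  have h := main_loop (pvSplit text) [] [] 0
  simpa [cleanA] using h
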